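-- pv_equiv track=rewrite | github.com/aqbayadwala/sm-app-backend | app/utils.py | assign_lines
-- ===== SOURCE A (Python) =====
-- def assign_lines(total_lines, student_grades, grade_lines):
--     # Initialize workload dictionary
--     workload = {student: 0 for student in student_grades.keys()}
--     workload["Sadr"] = 0  # Initialize Sadr's workload
--
--     for grade, grade_line_allocation in grade_lines.items():
--         # Filter students belonging to the current grade
--         students = [student for student, g in student_grades.items() if g == grade]
--
--         # If there are no students for this grade, assign the lines to Sadr
--         if not students:
--             workload["Sadr"] += grade_line_allocation
--             continue
--
--         # Special condition for Grade D: each student gets exactly 1 line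
--         if grade == "D":
--             for student in students:
--                 workload[student] += 1
--                 grade_line_allocation -= 1
--
--             # Assign any leftover lines for Grade D to Sadr
--             workload["Sadr"] += grade_line_allocation
--             continue
--
--         # Distribute lines equally among students for other grades
--         lines_per_student = grade_line_allocation // len(students)
--         remaining_lines = grade_line_allocation % len(students)
--
--         for student in students:
--             workload[student] += lines_per_student
--
--         # Distribute any leftover lines in a round-robin manner
--         for i in range(remaining_lines):
--             student_id = students[i % len(students)]
--             workload[student_id] += 1
--
--     # Assign any remaining lines (if total lines exceed allocated grade lines) to Sadr
--     allocated_lines = sum(workload.values())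
--     if allocated_lines < total_lines:
--         workload["Sadr"] += total_lines - allocated_lines
--
--     return workload
-- ===== SOURCE B (Python) =====
-- def assign_lines(total_lines, student_grades, grade_lines):
--     # Pass 1: grade sizes and each student's rank within its grade.
--     counts = {}
--     pos = {}
--     for student, g in student_grades.items():
--         pos[student] = counts.get(g, 0)
--         counts[g] = pos[student] + 1
--
--     # Pass 2: each student's lines by closed form (no distribution loops).
--     workload = {}
--     for student, g in student_grades.items():
--         if g not in grade_lines:
--             workload[student] = 0
--         elif g == "D":
--             workload[student] = 1
--         else:
--             q, r = divmod(grade_lines[g], counts[g])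
--             workload[student] = q + (1 if pos[student] < r else 0)
--
--     # Sadr: allocations of empty grades plus Grade-D leftovers; every grade's
--     # allocation is handed out in full, so the allocated total is just
--     # sum(grade_lines.values()) and the top-up is closed-form too.
--     sadr = 0
--     for g, a in grade_lines.items():
--         if counts.get(g, 0) == 0:
--             sadr += a
--         elif g == "D":
--             sadr += a - counts[g]
--     total_alloc = sum(grade_lines.values())
--     if total_alloc < total_lines:
--         sadr += total_lines - total_alloc
--     workload["Sadr"] = workload.get("Sadr", 0) + sadr
--     return workload
-- ===== Notes on version B (the rewrite author's own statement) =====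
-- stated objective: faster
-- what changed: B replaces A's per-grade rescans and distribution loops by closed forms: one counting pass records each grade's size and each student's rank within its grade, each student's lines are then computed directly as divmod share (+1 if rank < remainder), and Sadr's total is obtained arithmetically from sum(grade_lines.values()) instead of summing the built dict.
import Mathlib
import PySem

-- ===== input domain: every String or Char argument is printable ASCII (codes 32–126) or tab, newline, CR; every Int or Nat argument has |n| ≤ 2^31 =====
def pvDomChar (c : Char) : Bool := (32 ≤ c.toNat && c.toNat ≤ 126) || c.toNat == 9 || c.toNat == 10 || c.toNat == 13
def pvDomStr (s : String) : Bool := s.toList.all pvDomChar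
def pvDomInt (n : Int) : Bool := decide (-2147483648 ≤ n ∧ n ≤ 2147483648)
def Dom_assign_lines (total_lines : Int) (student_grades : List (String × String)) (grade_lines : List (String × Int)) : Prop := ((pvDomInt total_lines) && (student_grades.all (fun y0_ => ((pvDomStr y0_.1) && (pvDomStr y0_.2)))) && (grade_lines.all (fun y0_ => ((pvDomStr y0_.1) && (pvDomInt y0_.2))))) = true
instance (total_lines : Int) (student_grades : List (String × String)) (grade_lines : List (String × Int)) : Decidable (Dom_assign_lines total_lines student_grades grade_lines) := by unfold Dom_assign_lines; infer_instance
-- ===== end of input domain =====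

-- B replaces A's per-grade distribution loops by a closed form: one counting pass gives each
-- student's grade size and rank, each student's lines are then computed directly, and Sadr's
-- total is obtained arithmetically from sum(grade_lines.values()) — no round-robin loops.

-- ===== PORT A =====
-- 'workload[student] += x' for a key that is always present: insert with getD is exact there
def pvBump (d : PySem.Dict String Int) (k : String) (a : Int) : PySem.Dict String Int :=
  d.insert k (d.getD k 0 + a)

-- workload = {student: 0 for student in …}; workload["Sadr"] = 0
def pvInit (sg : PySem.Dict String String) : PySem.Dict String Int :=
  (sg.keys.foldl (fun d s => d.insert s 0) PySem.Dict.empty).insert "Sadr" 0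

-- students = [student for student, g in student_grades.items() if g == grade]
def pvStudentsOf (sg : PySem.Dict String String) (g : String) : List String :=
  (sg.items.filter (fun q => q.2 == g)).map (·.1)

-- the body of A's 'for grade, grade_line_allocation in grade_lines.items()' loop
def pvStepA (sg : PySem.Dict String String) (w : PySem.Dict String Int) (p : String × Int) : PySem.Dict String Int :=
  let grade := p.1
  let alloc := p.2
  let students := pvStudentsOf sg grade
  if students.isEmpty then
    pvBump w "Sadr" alloc
  else if grade == "D" then
    -- loop state: (workload, grade_line_allocation)
    let st := students.foldl (fun (s : PySem.Dict String Int × Int) stu => (pvBump s.1 stu 1, s.2 - 1)) (w, alloc)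
    pvBump st.1 "Sadr" st.2
  else
    let n : Int := students.length
    let lps := PySem.Int.floordiv alloc n
    let rem := PySem.Int.mod alloc n
    let w1 := students.foldl (fun w stu => pvBump w stu lps) w
    -- students[i % len(students)] is always in range, so pyGetD is exact here
    (PySem.List.pyRange 0 rem 1).foldl (fun w i => pvBump w (PySem.List.pyGetD students (PySem.Int.mod i n) "") 1) w1

def assign_lines (total_lines : Int) (student_grades : List (String × String)) (grade_lines : List (String × Int)) : List (String × Int) :=
  let sg := PySem.Dict.ofList student_grades
  let gl := PySem.Dict.ofList grade_lines
  let workload := gl.items.foldl (pvStepA sg) (pvInit sg)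
  let allocated := workload.values.sum
  let workload := if allocated < total_lines then pvBump workload "Sadr" (total_lines - allocated) else workload
  workload.items

-- ===== PORT B =====
-- pass 1: 'pos[student] = counts.get(g, 0); counts[g] = pos[student] + 1'
def pvPass1Step (st : PySem.Dict String Int × PySem.Dict String Int) (p : String × String) :
    PySem.Dict String Int × PySem.Dict String Int :=
  let i := st.1.getD p.2 0
  (st.1.insert p.2 (i + 1), st.2.insert p.1 i)

-- pass 2 body: the closed-form number of lines of one student
-- (grade_lines[g] / counts[g] are lookups of keys known to be present: getD is exact there)
def pvVal (gl : PySem.Dict String Int) (counts pos : PySem.Dict String Int) (p : String × String) : Int :=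
  if gl.contains p.2 = false then 0
  else if p.2 == "D" then 1
  else
    PySem.Int.floordiv (gl.getD p.2 0) (counts.getD p.2 0)
      + (if pos.getD p.1 0 < PySem.Int.mod (gl.getD p.2 0) (counts.getD p.2 0) then 1 else 0)

-- the body of B's 'for g, a in grade_lines.items()' Sadr loop
def pvSadrStep (counts : PySem.Dict String Int) (s : Int) (q : String × Int) : Int :=
  if counts.getD q.1 0 == 0 then s + q.2
  else if q.1 == "D" then s + (q.2 - counts.getD q.1 0)
  else s

def assign_lines_alt (total_lines : Int) (student_grades : List (String × String)) (grade_lines : List (String × Int)) : List (String × Int) :=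
  let sg := PySem.Dict.ofList student_grades
  let gl := PySem.Dict.ofList grade_lines
  let cp := sg.items.foldl pvPass1Step (PySem.Dict.empty, PySem.Dict.empty)
  let workload := sg.items.foldl (fun w p => w.insert p.1 (pvVal gl cp.1 cp.2 p)) PySem.Dict.empty
  let sadr0 := gl.items.foldl (pvSadrStep cp.1) 0
  let total_alloc := gl.values.sum
  let sadr := if total_alloc < total_lines then sadr0 + (total_lines - total_alloc) else sadr0
  (workload.insert "Sadr" (workload.getD "Sadr" 0 + sadr)).items

-- ===== PRECONDITION & SPEC =====
def Spec_assign_lines (total_lines : Int) (student_grades : List (String × String)) (grade_lines : List (String × Int)) (out : List (String × Int)) : Prop := out = assign_lines_alt total_lines student_grades grade_lines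
instance (total_lines : Int) (student_grades : List (String × String)) (grade_lines : List (String × Int)) (out : List (String × Int)) : Decidable (Spec_assign_lines total_lines student_grades grade_lines out) := by unfold Spec_assign_lines; infer_instance

-- ===== CLAIM (what is proved, stated in full; the proofs are below) =====
def Claim_equal_assign_lines : Prop := ∀ (total_lines : Int) (student_grades : List (String × String)) (grade_lines : List (String × Int)), Dom_assign_lines total_lines student_grades grade_lines → Spec_assign_lines total_lines student_grades grade_lines (assign_lines total_lines student_grades grade_lines)

-- ===== LEMMAS AND PROOFS =====

-- add f k to the value at every key k, keeping the item list's shape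
def pvMapAdd (d : PySem.Dict String Int) (f : String → Int) : PySem.Dict String Int :=
  PySem.Dict.mk (d.items.map (fun p => (p.1, p.2 + f p.1)))

theorem pvMapAdd_keys (d : PySem.Dict String Int) (f : String → Int) :
    (pvMapAdd d f).keys = d.keys := by
  simp [pvMapAdd, PySem.Dict.keys, List.map_map, Function.comp_def]

theorem pvMapAdd_mapAdd (d : PySem.Dict String Int) (f g : String → Int) :
    pvMapAdd (pvMapAdd d f) g = pvMapAdd d (fun k => f k + g k) := by
  simp [pvMapAdd, List.map_map, Function.comp_def, add_assoc]

theorem pvMapAdd_congr (d : PySem.Dict String Int) (f g : String → Int)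
    (h : ∀ k, f k = g k) : pvMapAdd d f = pvMapAdd d g := by
  have : f = g := funext h
  rw [this]

theorem pvMapAdd_zero (d : PySem.Dict String Int) : pvMapAdd d (fun _ => 0) = d := by
  cases d with
  | mk l => simp [pvMapAdd]

theorem pvBump_mem (d : PySem.Dict String Int) (k : String) (a : Int)
    (hnd : d.keys.Nodup) (h : k ∈ d.keys) :
    pvBump d k a = pvMapAdd d (fun k' => if k' = k then a else 0) := by
  have hc : d.contains k = true := (PySem.Dict.contains_iff_mem_keys d k).2 h
  apply PySem.Dict.ext
  show (d.insert k (d.getD k 0 + a)).items = _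
  rw [PySem.Dict.items_insert_of_contains d _ hc]
  apply List.map_congr_left
  intro p hp
  by_cases hk : p.1 = k
  · have hpe : (k, p.2) ∈ d.items := by
      have : p = (k, p.2) := by rw [← hk]
      rw [← this]; exact hp
    have hg : d.getD k 0 = p.2 := PySem.Dict.getD_of_mem_items d hpe hnd 0
    simp [hk, hg, add_comm]
  · simp [hk]

theorem pvConstLoop (xs : List String) (c : Int) (d : PySem.Dict String Int)
    (hnd : d.keys.Nodup) (hmem : ∀ x ∈ xs, x ∈ d.keys) :
    xs.foldl (fun w s => pvBump w s c) d = pvMapAdd d (fun k => c * (xs.count k : Int)) := by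
  induction xs generalizing d with
  | nil => simp [pvMapAdd_zero d]
  | cons x t ih =>
    have hx : x ∈ d.keys := hmem x (by simp)
    simp only [List.foldl_cons]
    rw [pvBump_mem d x c hnd hx]
    rw [ih (pvMapAdd d _) (by rw [pvMapAdd_keys]; exact hnd)
        (fun y hy => by rw [pvMapAdd_keys]; exact hmem y (List.mem_cons_of_mem _ hy))]
    rw [pvMapAdd_mapAdd]
    apply pvMapAdd_congr
    intro k
    simp only [List.count_cons]
    push_cast
    by_cases hk : k = x
    · simp [hk]; ring
    · have : ¬ (x == k) = true := by simpa using fun h => hk h.symm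
      simp [hk, this]

theorem pvPairLoop (xs : List String) (d : PySem.Dict String Int) (a : Int) :
    xs.foldl (fun (s : PySem.Dict String Int × Int) stu => (pvBump s.1 stu 1, s.2 - 1)) (d, a)
      = (xs.foldl (fun w stu => pvBump w stu 1) d, a - (xs.length : Int)) := by
  induction xs generalizing d a with
  | nil => simp
  | cons x t ih =>
    simp only [List.foldl_cons]
    rw [ih]
    have : a - 1 - (t.length : Int) = a - ((x :: t).length : Int) := by simp [List.length_cons]; ring
    rw [this]

theorem pvRangeTake (xs : List String) (m : Nat) (hm : m ≤ xs.length) (d : PySem.Dict String Int) :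
    (PySem.List.pyRange 0 (m : Int) 1).foldl (fun w i => pvBump w (PySem.List.pyGetD xs i "") 1) d
      = (xs.take m).foldl (fun w s => pvBump w s 1) d := by
  induction m with
  | zero => simp
  | succ n ih =>
    have h1 : ((n + 1 : Nat) : Int) = (n : Int) + 1 := by push_cast; ring
    rw [h1, PySem.List.pyRange_one_succ_right (by positivity)]
    have hn : n < xs.length := by omega
    rw [List.foldl_append, ih (by omega)]
    rw [List.take_add_one]
    rw [List.foldl_append]
    simp [List.getElem?_eq_getElem hn, PySem.List.pyGetD_natCast]

theorem pvStudents_nodup (sg : PySem.Dict String String) (hnd : sg.keys.Nodup) (g : String) :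
    (pvStudentsOf sg g).Nodup := by
  have hsub : List.Sublist ((sg.items.filter (fun q => q.2 == g)).map (·.1)) (sg.items.map (·.1)) :=
    List.Sublist.map _ List.filter_sublist
  exact hsub.nodup (by exact hnd)

theorem pvStudents_mem (sg : PySem.Dict String String) (g : String) (x : String)
    (hx : x ∈ pvStudentsOf sg g) : x ∈ sg.keys := by
  obtain ⟨p, hp, hpx⟩ := List.mem_map.1 hx
  have := List.mem_of_mem_filter hp
  show x ∈ sg.items.map (·.1)
  exact hpx ▸ List.mem_map_of_mem this

-- per-grade addition to a student slot / to the Sadr slot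
def pvStu (sg : PySem.Dict String String) (p : String × Int) (k : String) : Int :=
  let S := pvStudentsOf sg p.1
  if S.isEmpty then 0
  else if p.1 == "D" then (S.count k : Int)
  else PySem.Int.floordiv p.2 (S.length : Int) * (S.count k : Int)
        + (((S.take (PySem.Int.mod p.2 (S.length : Int)).toNat).count k : Int))

def pvSad (sg : PySem.Dict String String) (p : String × Int) : Int :=
  let S := pvStudentsOf sg p.1
  if S.isEmpty then p.2 else if p.1 == "D" then p.2 - (S.length : Int) else 0

def pvFA (sg : PySem.Dict String String) (p : String × Int) (k : String) : Int :=
  pvStu sg p k + (if k = "Sadr" then pvSad sg p else 0)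

-- invariant kept through the grade loop
def pvP (sg : PySem.Dict String String) (d : PySem.Dict String Int) : Prop :=
  d.keys.Nodup ∧ "Sadr" ∈ d.keys ∧ ∀ s ∈ sg.keys, s ∈ d.keys

theorem pvInitFold_nodup (xs : List String) (d : PySem.Dict String Int) (hnd : d.keys.Nodup) :
    (xs.foldl (fun d s => d.insert s 0) d).keys.Nodup := by
  induction xs generalizing d with
  | nil => exact hnd
  | cons x t ih => exact ih _ (PySem.Dict.nodup_keys_insert d x 0 hnd)

theorem pvInitFold_mem (xs : List String) (d : PySem.Dict String Int) (k : String)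
    (h : k ∈ xs ∨ k ∈ d.keys) : k ∈ (xs.foldl (fun d s => d.insert s 0) d).keys := by
  induction xs generalizing d with
  | nil => simpa using h
  | cons x t ih =>
    simp only [List.foldl_cons]
    apply ih
    rcases h with h | h
    · rcases List.mem_cons.1 h with h | h
      · right; rw [PySem.Dict.mem_keys_insert]; left; exact h
      · left; exact h
    · right; rw [PySem.Dict.mem_keys_insert]; right; exact h

theorem pvInitP (sg : PySem.Dict String String) : pvP sg (pvInit sg) := by
  unfold pvP pvInit
  refine ⟨?_, ?_, ?_⟩
  · exact PySem.Dict.nodup_keys_insert _ _ _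
      (pvInitFold_nodup sg.keys PySem.Dict.empty (by simp [PySem.Dict.keys_empty]))
  · rw [PySem.Dict.mem_keys_insert]; left; rfl
  · intro s hs
    rw [PySem.Dict.mem_keys_insert]; right
    exact pvInitFold_mem sg.keys PySem.Dict.empty s (Or.inl hs)

-- A's step is a pointwise addition of pvFA
theorem pvStepA_eq (sg : PySem.Dict String String) (hsg : sg.keys.Nodup)
    (d : PySem.Dict String Int) (hP : pvP sg d) (p : String × Int) :
    pvStepA sg d p = pvMapAdd d (pvFA sg p) := by
  obtain ⟨hnd, hS, hsub⟩ := hP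
  set S := pvStudentsOf sg p.1 with hSdef
  have hstuM : ∀ x ∈ S, x ∈ d.keys := fun x hx => hsub x (pvStudents_mem sg p.1 x hx)
  unfold pvStepA
  show (if S.isEmpty then _ else _) = _
  by_cases hemp : S.isEmpty
  · simp only [hemp, if_true]
    rw [pvBump_mem d _ _ hnd hS]
    apply pvMapAdd_congr
    intro k
    simp [pvFA, pvStu, pvSad, ← hSdef, hemp]
  · simp only [hemp, if_false, Bool.false_eq_true]
    have hlen : 0 < S.length :=
      List.length_pos_of_ne_nil (by simpa [List.isEmpty_iff] using hemp)
    have hlenI : 0 < (S.length : Int) := by exact_mod_cast hlen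
    by_cases hD : (p.1 == "D") = true
    · simp only [hD, if_true]
      rw [pvPairLoop]
      rw [pvConstLoop S 1 d hnd hstuM]
      rw [pvBump_mem _ "Sadr" _ (by rw [pvMapAdd_keys]; exact hnd) (by rw [pvMapAdd_keys]; exact hS)]
      rw [pvMapAdd_mapAdd]
      apply pvMapAdd_congr
      intro k
      simp [pvFA, pvStu, pvSad, ← hSdef, hemp, hD]
    · simp only [hD, if_false, Bool.false_eq_true]
      have hmodlt := PySem.Int.mod_lt p.2 hlenI
      have hmodnn := PySem.Int.mod_nonneg p.2 hlenI
      set rem := PySem.Int.mod p.2 (S.length : Int) with hremdef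
      have hcongr : (PySem.List.pyRange 0 rem 1).foldl
            (fun w i => pvBump w (PySem.List.pyGetD S (PySem.Int.mod i (S.length : Int)) "") 1)
            (S.foldl (fun w stu => pvBump w stu (PySem.Int.floordiv p.2 (S.length : Int))) d)
          = (PySem.List.pyRange 0 rem 1).foldl
            (fun w i => pvBump w (PySem.List.pyGetD S i "") 1)
            (S.foldl (fun w stu => pvBump w stu (PySem.Int.floordiv p.2 (S.length : Int))) d) := by
        apply PySem.List.foldl_congr_mem
        intro acc i hi
        rw [PySem.List.mem_pyRange_one] at hi
        have : PySem.Int.mod i (S.length : Int) = i := by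
          rw [PySem.Int.mod_eq_emod_of_pos hlenI]
          exact Int.emod_eq_of_lt hi.1 (by omega)
        rw [this]
      rw [hcongr]
      have hremm : rem = ((rem.toNat : Nat) : Int) := (Int.toNat_of_nonneg hmodnn).symm
      rw [hremm, pvRangeTake S rem.toNat (by omega) _]
      rw [pvConstLoop S _ d hnd hstuM]
      rw [pvConstLoop (S.take rem.toNat) 1 (pvMapAdd d _)
          (by rw [pvMapAdd_keys]; exact hnd)
          (fun x hx => by rw [pvMapAdd_keys]; exact hstuM x (List.mem_of_mem_take hx))]
      rw [pvMapAdd_mapAdd]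
      apply pvMapAdd_congr
      intro k
      simp [pvFA, pvStu, pvSad, ← hSdef, hemp, hD, ← hremdef]

theorem pvLoopA (sg : PySem.Dict String String) (hsg : sg.keys.Nodup)
    (G : List (String × Int)) (d : PySem.Dict String Int) (hP : pvP sg d) :
    G.foldl (pvStepA sg) d = pvMapAdd d (fun k => (G.map (fun p => pvFA sg p k)).sum) := by
  induction G generalizing d with
  | nil =>
    simp only [List.foldl_nil, List.map_nil, List.sum_nil]
    exact (pvMapAdd_zero d).symm
  | cons p t ih =>
    simp only [List.foldl_cons]
    rw [pvStepA_eq sg hsg d hP p]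
    have hP' : pvP sg (pvMapAdd d (pvFA sg p)) := by
      unfold pvP at hP ⊢
      rw [pvMapAdd_keys]
      exact hP
    rw [ih _ hP', pvMapAdd_mapAdd]
    apply pvMapAdd_congr
    intro k
    simp

-- sums over a nodup key list
theorem pvSumIte (K : List String) (hK : K.Nodup) (x : String) (hx : x ∈ K) (c : Int) :
    (K.map (fun k => if k = x then c else 0)).sum = c := by
  induction K with
  | nil => cases hx
  | cons y t ih =>
    simp only [List.map_cons, List.sum_cons]
    by_cases hy : y = x
    · have hxt : x ∉ t := by subst hy; exact (List.nodup_cons.1 hK).1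
      have h0 : (t.map (fun k => if k = x then c else 0)).sum = 0 := by
        apply List.sum_eq_zero
        intro v hv
        obtain ⟨k, hk, hkv⟩ := List.mem_map.1 hv
        have hne : k ≠ x := fun h => hxt (h ▸ hk)
        simpa [hne] using hkv.symm
      simp [hy, h0]
    · have hxt : x ∈ t := by
        rcases List.mem_cons.1 hx with h | h
        · exact absurd h.symm hy
        · exact h
      rw [ih (List.nodup_cons.1 hK).2 hxt]
      simp [hy]

theorem pvSumCount (K : List String) (hK : K.Nodup) (S : List String)
    (hS : ∀ x ∈ S, x ∈ K) :
    (K.map (fun k => (S.count k : Int))).sum = (S.length : Int) := by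
  induction S with
  | nil => simp
  | cons x t ih =>
    have hcongr : K.map (fun k => ((x :: t).count k : Int))
        = K.map (fun k => (t.count k : Int) + (if k = x then 1 else 0)) := by
      apply List.map_congr_left
      intro k _
      simp only [List.count_cons]
      rcases eq_or_ne k x with hk | hk
      · subst hk; push_cast; simp
      · have hb : (k == x) = false := by simpa using hk
        simp only [hb, if_false, Bool.false_eq_true, hk]
        push_cast
        simp
        exact fun h => hk h.symm
    rw [hcongr, PySem.List.sum_map_add_int,
        ih (fun y hy => hS y (List.mem_cons_of_mem _ hy)),
        pvSumIte K hK x (hS x (by simp)) 1]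
    push_cast [List.length_cons]
    ring

theorem pvSumSwap (K : List String) (G : List (String × Int)) (f : (String × Int) → String → Int) :
    (K.map (fun k => (G.map (fun p => f p k)).sum)).sum
      = (G.map (fun p => (K.map (fun k => f p k)).sum)).sum := by
  induction G with
  | nil => simp
  | cons q t ih =>
    have : K.map (fun k => ((q :: t).map (fun p => f p k)).sum)
        = K.map (fun k => f q k + (t.map (fun p => f p k)).sum) := by
      apply List.map_congr_left; intro k _; simp
    rw [this, PySem.List.sum_map_add_int, ih]
    simp

-- Σ_{k∈K} pvFA sg p k = p.2 : each grade's allocation is handed out in full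
theorem pvFA_total (sg : PySem.Dict String String) (K : List String)
    (hK : K.Nodup) (hSadr : "Sadr" ∈ K) (hsub : ∀ s ∈ sg.keys, s ∈ K)
    (p : String × Int) :
    (K.map (fun k => pvFA sg p k)).sum = p.2 := by
  have hsplit : K.map (fun k => pvFA sg p k)
      = K.map (fun k => pvStu sg p k + (if k = "Sadr" then pvSad sg p else 0)) := rfl
  rw [hsplit, PySem.List.sum_map_add_int, pvSumIte K hK _ hSadr]
  set S := pvStudentsOf sg p.1 with hSdef
  have hSK : ∀ x ∈ S, x ∈ K := fun x hx => hsub x (pvStudents_mem sg p.1 x hx)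
  by_cases hemp : S.isEmpty
  · have h0 : (K.map (fun k => pvStu sg p k)).sum = 0 := by
      apply List.sum_eq_zero
      intro v hv
      obtain ⟨k, _, hkv⟩ := List.mem_map.1 hv
      simpa [pvStu, ← hSdef, hemp] using hkv.symm
    rw [h0]
    simp [pvSad, ← hSdef, hemp]
  · have hlen : 0 < S.length :=
      List.length_pos_of_ne_nil (by simpa [List.isEmpty_iff] using hemp)
    have hlenI : 0 < (S.length : Int) := by exact_mod_cast hlen
    by_cases hD : (p.1 == "D") = true
    · have : K.map (fun k => pvStu sg p k) = K.map (fun k => (S.count k : Int)) := by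
        apply List.map_congr_left; intro k _
        simp [pvStu, ← hSdef, hemp, hD]
      rw [this, pvSumCount K hK S hSK]
      simp [pvSad, ← hSdef, hemp, hD]
    · set rem := PySem.Int.mod p.2 (S.length : Int) with hremdef
      have hmodlt := PySem.Int.mod_lt p.2 hlenI
      have hmodnn := PySem.Int.mod_nonneg p.2 hlenI
      have : K.map (fun k => pvStu sg p k)
          = K.map (fun k => PySem.Int.floordiv p.2 (S.length : Int) * (S.count k : Int)
              + ((S.take rem.toNat).count k : Int)) := by
        apply List.map_congr_left; intro k _
        simp [pvStu, ← hSdef, hemp, hD, ← hremdef]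
      rw [this, PySem.List.sum_map_add_int, PySem.List.sum_map_const_mul_int,
          pvSumCount K hK S hSK,
          pvSumCount K hK (S.take rem.toNat) (fun x hx => hSK x (List.mem_of_mem_take hx))]
      have hlt : (S.take rem.toNat).length = rem.toNat := by
        rw [List.length_take]
        omega
      rw [hlt]
      have hid := PySem.Int.floordiv_mul_add_mod p.2 (S.length : Int)
      have : ((rem.toNat : Nat) : Int) = rem := Int.toNat_of_nonneg hmodnn
      rw [this]
      simp [pvSad, ← hSdef, hemp, hD, ← hremdef]
      omega

-- value list of a pointwise addition
theorem pvMapAdd_values (d : PySem.Dict String Int) (f : String → Int) :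
    (pvMapAdd d f).values = d.items.map (fun p => p.2 + f p.1) := by
  simp [pvMapAdd, PySem.Dict.values, List.map_map, Function.comp_def]

-- pass-1 characterisation: counts and positions
theorem pvPass1_counts (l : List (String × String)) (c0 p0 : PySem.Dict String Int) (g : String) :
    ((l.foldl pvPass1Step (c0, p0)).1).getD g 0
      = c0.getD g 0 + ((l.filter (fun q => q.2 == g)).length : Int) := by
  induction l generalizing c0 p0 with
  | nil => simp
  | cons x t ih =>
    simp only [List.foldl_cons, pvPass1Step]
    rw [ih]
    rw [List.filter_cons]
    by_cases hx : x.2 = g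
    · have hb : (x.2 == g) = true := by simp [hx]
      rw [PySem.Dict.getD_insert]
      simp only [hx, if_pos rfl, hb, beq_self_eq_true, if_true, List.length_cons]
      push_cast
      ring
    · have hb : ¬ (x.2 == g) = true := by simpa using hx
      rw [PySem.Dict.getD_insert]
      simp [Ne.symm hx, hb, hx]

theorem pvPass1_pos_untouched (l : List (String × String)) (st : PySem.Dict String Int × PySem.Dict String Int)
    (s : String) (h : ∀ q ∈ l, q.1 ≠ s) :
    ((l.foldl pvPass1Step st).2).getD s 0 = st.2.getD s 0 := by
  induction l generalizing st with
  | nil => simp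
  | cons x t ih =>
    simp only [List.foldl_cons, pvPass1Step]
    rw [ih _ (fun q hq => h q (List.mem_cons_of_mem _ hq))]
    exact PySem.Dict.getD_insert_of_ne _ _ _ (Ne.symm (h x (by simp)))

theorem pvPass1_pos (l1 l2 : List (String × String)) (s g : String)
    (h2 : ∀ q ∈ l2, q.1 ≠ s) :
    (((l1 ++ (s, g) :: l2).foldl pvPass1Step (PySem.Dict.empty, PySem.Dict.empty)).2).getD s 0
      = ((l1.filter (fun q => q.2 == g)).length : Int) := by
  rw [List.foldl_append, List.foldl_cons]
  rw [pvPass1_pos_untouched l2 _ s h2]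
  show ((_ : PySem.Dict String Int).insert s _).getD s 0 = _
  rw [PySem.Dict.getD_insert_self]
  have := pvPass1_counts l1 PySem.Dict.empty PySem.Dict.empty g
  simp only [PySem.Dict.getD_empty] at this
  simpa using this

-- counts.get(g, 0) is the size of grade g
theorem pvCounts_getD (sg : PySem.Dict String String) (g : String) :
    ((sg.items.foldl pvPass1Step (PySem.Dict.empty, PySem.Dict.empty)).1).getD g 0
      = ((pvStudentsOf sg g).length : Int) := by
  rw [pvPass1_counts]
  simp [pvStudentsOf]

-- the Sadr loop of B is Σ pvSad
theorem pvSadr0_eq (sg : PySem.Dict String String) (G : List (String × Int)) :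
    G.foldl (pvSadrStep ((sg.items.foldl pvPass1Step (PySem.Dict.empty, PySem.Dict.empty)).1)) 0
      = (G.map (fun p => pvSad sg p)).sum := by
  have hstep : ∀ (a : Int) (q : String × Int), q ∈ G →
      pvSadrStep ((sg.items.foldl pvPass1Step (PySem.Dict.empty, PySem.Dict.empty)).1) a q
        = a + pvSad sg q := by
    intro a q _
    unfold pvSadrStep pvSad
    rw [pvCounts_getD]
    set S := pvStudentsOf sg q.1 with hSdef
    by_cases hemp : S.isEmpty
    · have : S.length = 0 := by simpa [List.isEmpty_iff, List.length_eq_zero_iff] using hemp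
      simp [this, hemp]
    · have hlen : 0 < S.length :=
        List.length_pos_of_ne_nil (by simpa [List.isEmpty_iff] using hemp)
      have : ¬ (((S.length : Int)) == 0) = true := by
        simp only [beq_iff_eq]
        intro h
        omega
      by_cases hD : (q.1 == "D") = true
      · simp [this, hD, hemp]
      · simp [this, hD, hemp]
  rw [PySem.List.foldl_congr_mem G _ (fun a q => a + pvSad sg q) 0 hstep,
      PySem.List.foldl_add]
  simp

-- pvStu vanishes off the student's own grade
theorem pvStu_zero_of_ne (sg : PySem.Dict String String) (hsg : sg.keys.Nodup)
    (s g : String) (hmem : (s, g) ∈ sg.items) (p : String × Int) (hne : p.1 ≠ g) :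
    pvStu sg p s = 0 := by
  have hnotin : s ∉ pvStudentsOf sg p.1 := by
    intro h
    obtain ⟨q, hq, hq1⟩ := List.mem_map.1 h
    have hqi : q ∈ sg.items := List.mem_of_mem_filter hq
    have hq2 : q.2 = p.1 := by simpa using List.of_mem_filter hq
    have e1 : sg.get? q.1 = some q.2 := PySem.Dict.get?_of_mem_items sg (by
      have : (q.1, q.2) = q := rfl
      rw [this]; exact hqi) hsg
    have e2 : sg.get? s = some g := PySem.Dict.get?_of_mem_items sg hmem hsg
    rw [hq1] at e1
    rw [e1] at e2
    exact hne (by injection e2 with h'; rw [← hq2, h'])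
  have hc : (pvStudentsOf sg p.1).count s = 0 := List.count_eq_zero.2 hnotin
  have hct : ∀ m, ((pvStudentsOf sg p.1).take m).count s = 0 :=
    fun m => List.count_eq_zero.2 (fun h => hnotin (List.mem_of_mem_take h))
  unfold pvStu
  split_ifs <;> simp [hc, hct]

theorem pvStu_zero_of_not_key (sg : PySem.Dict String String) (k : String)
    (hk : k ∉ sg.keys) (p : String × Int) : pvStu sg p k = 0 := by
  have hnotin : k ∉ pvStudentsOf sg p.1 := fun h => hk (pvStudents_mem sg p.1 k h)
  have hc : (pvStudentsOf sg p.1).count k = 0 := List.count_eq_zero.2 hnotin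
  have hct : ∀ m, ((pvStudentsOf sg p.1).take m).count k = 0 :=
    fun m => List.count_eq_zero.2 (fun h => hnotin (List.mem_of_mem_take h))
  unfold pvStu
  split_ifs <;> simp [hc, hct]

theorem pvSumSingle (G : List (String × Int)) (hG : (G.map (·.1)).Nodup)
    (g : String) (a : Int) (hmem : (g, a) ∈ G) (F : (String × Int) → Int)
    (hzero : ∀ p ∈ G, p.1 ≠ g → F p = 0) :
    (G.map F).sum = F (g, a) := by
  induction G with
  | nil => cases hmem
  | cons q t ih =>
    rw [List.map_cons] at hG
    have hhead : q.1 ∉ t.map (·.1) := (List.nodup_cons.1 hG).1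
    have htail : (t.map (·.1)).Nodup := (List.nodup_cons.1 hG).2
    simp only [List.map_cons, List.sum_cons]
    by_cases hq : q = (g, a)
    · have hgt : g ∉ t.map (·.1) := by
        rw [← show q.1 = g from by rw [hq]]
        exact hhead
      have h0 : (t.map F).sum = 0 := by
        apply List.sum_eq_zero
        intro v hv
        obtain ⟨p, hp, hpv⟩ := List.mem_map.1 hv
        have hne : p.1 ≠ g := fun h => hgt (h ▸ List.mem_map_of_mem hp)
        rw [← hpv]
        exact hzero p (List.mem_cons_of_mem _ hp) hne
      rw [hq, h0, add_zero]
    · have hmt : (g, a) ∈ t := by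
        rcases List.mem_cons.1 hmem with h | h
        · exact absurd h.symm hq
        · exact h
      have hq1 : q.1 ≠ g := by
        intro h
        exact hhead (h ▸ List.mem_map_of_mem hmt)
      rw [hzero q (by simp) hq1, zero_add]
      exact ih htail hmt (fun p hp => hzero p (List.mem_cons_of_mem _ hp))

theorem pvSumZero (G : List (String × Int)) (F : (String × Int) → Int)
    (hzero : ∀ p ∈ G, F p = 0) : (G.map F).sum = 0 := by
  apply List.sum_eq_zero
  intro v hv
  obtain ⟨p, hp, hpv⟩ := List.mem_map.1 hv
  rw [← hpv]; exact hzero p hp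

-- count inside a take of a list with a single occurrence
theorem pvCountTake (P Q : List String) (s : String) (hP : s ∉ P) (hQ : s ∉ Q) (m : Nat) :
    ((P ++ s :: Q).take m).count s = if P.length < m then 1 else 0 := by
  rw [List.take_append, List.count_append]
  have h1 : (P.take m).count s = 0 :=
    List.count_eq_zero.2 (fun h => hP (List.mem_of_mem_take h))
  rw [h1]
  by_cases hm : P.length < m
  · have hsplit : m - P.length = (m - P.length - 1) + 1 := by omega
    rw [hsplit, List.take_succ_cons, List.count_cons_self]
    have h2 : (Q.take (m - P.length - 1)).count s = 0 :=
      List.count_eq_zero.2 (fun h => hQ (List.mem_of_mem_take h))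
    simp [h2, hm]
  · have h0 : m - P.length = 0 := by omega
    simp [h0, hm]

-- the heart: Σ over grades of pvStu at one student = B's closed form
theorem pvKeySum (student_grades : List (String × String)) (grade_lines : List (String × Int))
    (s g : String)
    (hmem : (s, g) ∈ (PySem.Dict.ofList student_grades).items) :
    ((PySem.Dict.ofList grade_lines).items.map
        (fun p => pvStu (PySem.Dict.ofList student_grades) p s)).sum
      = pvVal (PySem.Dict.ofList grade_lines)
          ((((PySem.Dict.ofList student_grades).items.foldl pvPass1Step (PySem.Dict.empty, PySem.Dict.empty))).1)
          ((((PySem.Dict.ofList student_grades).items.foldl pvPass1Step (PySem.Dict.empty, PySem.Dict.empty))).2)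
          (s, g) := by
  set sg := PySem.Dict.ofList student_grades with hsgdef
  set gl := PySem.Dict.ofList grade_lines with hgldef
  have hsg : sg.keys.Nodup := PySem.Dict.nodup_keys_ofList student_grades
  have hgl : gl.keys.Nodup := PySem.Dict.nodup_keys_ofList grade_lines
  by_cases hc : gl.contains g = true
  · -- grade present: exactly one term survives
    obtain ⟨a, ha⟩ : ∃ a, gl.get? g = some a := by
      have := PySem.Dict.contains_eq_isSome_get? gl g
      rw [hc] at this
      cases h : gl.get? g with
      | none => rw [h] at this; simp at this
      | some a => exact ⟨a, rfl⟩
    have hga : (g, a) ∈ gl.items := PySem.Dict.mem_items_of_get?_eq_some gl ha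
    rw [pvSumSingle gl.items hgl g a hga _
        (fun p hp hne => pvStu_zero_of_ne sg hsg s g hmem p hne)]
    -- now compute pvStu sg (g, a) s and pvVal
    obtain ⟨l1, l2, hsplit⟩ := List.mem_iff_append.1 hmem
    have hkeys : sg.keys = l1.map (·.1) ++ s :: l2.map (·.1) := by
      show sg.items.map (·.1) = _
      rw [hsplit]; simp
    have hnd' : (l1.map (·.1) ++ s :: l2.map (·.1)).Nodup := hkeys ▸ hsg
    have hs1 : s ∉ l1.map (·.1) := by
      have := List.disjoint_of_nodup_append hnd'
      intro h
      exact this h (by simp)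
    have hs2 : s ∉ l2.map (·.1) := by
      have := (List.nodup_append.1 hnd').2.1
      exact (List.nodup_cons.1 this).1
    set P := (l1.filter (fun q => q.2 == g)).map (·.1) with hPdef
    set Q := (l2.filter (fun q => q.2 == g)).map (·.1) with hQdef
    have hSsplit : pvStudentsOf sg g = P ++ s :: Q := by
      unfold pvStudentsOf
      rw [hsplit, List.filter_append, List.filter_cons]
      simp [hPdef, hQdef]
    have hsP : s ∉ P := fun h => hs1 (by
      obtain ⟨q, hq, hq1⟩ := List.mem_map.1 h
      exact hq1 ▸ List.mem_map_of_mem (List.mem_of_mem_filter hq))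
    have hsQ : s ∉ Q := fun h => hs2 (by
      obtain ⟨q, hq, hq1⟩ := List.mem_map.1 h
      exact hq1 ▸ List.mem_map_of_mem (List.mem_of_mem_filter hq))
    have hpos : ((sg.items.foldl pvPass1Step (PySem.Dict.empty, PySem.Dict.empty)).2).getD s 0
        = (P.length : Int) := by
      rw [hsplit, pvPass1_pos l1 l2 s g (fun q hq h => hs2 (h ▸ List.mem_map_of_mem hq))]
      simp [hPdef]
    have hcnt := pvCounts_getD sg g
    have hglD : gl.getD g 0 = a := PySem.Dict.getD_of_get?_eq_some gl 0 ha
    have hSlen : 0 < (pvStudentsOf sg g).length := by rw [hSsplit]; simp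
    have hemp : ¬ (pvStudentsOf sg g).isEmpty = true := by
      rw [List.isEmpty_iff]
      intro h
      rw [h] at hSlen
      simp at hSlen
    have hcount1 : (pvStudentsOf sg g).count s = 1 :=
      List.count_eq_one_of_mem (pvStudents_nodup sg hsg g) (by rw [hSsplit]; simp)
    unfold pvVal pvStu
    simp only [hc, if_false, Bool.true_eq_false]
    by_cases hD : (g == "D") = true
    · simp [hD, hemp, hcount1]
    · simp only [hD, if_false, Bool.false_eq_true, hemp]
      rw [hglD, hcnt, hpos]
      set n := ((pvStudentsOf sg g).length : Int) with hndef
      have hnpos : 0 < n := by rw [hndef]; exact_mod_cast hSlen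
      set r := PySem.Int.mod a n with hrdef
      have hrnn : 0 ≤ r := PySem.Int.mod_nonneg a hnpos
      have htake : ((pvStudentsOf sg g).take r.toNat).count s
          = if P.length < r.toNat then 1 else 0 := by
        rw [hSsplit]
        exact pvCountTake P Q s hsP hsQ r.toNat
      rw [htake, hcount1]
      have hiff : P.length < r.toNat ↔ (P.length : Int) < r := by omega
      by_cases hlt : (P.length : Int) < r
      · simp [hiff.2, hlt]
      · have : ¬ P.length < r.toNat := fun h => hlt (hiff.1 h)
        simp [this, hlt]
  · -- grade absent: every term vanishes
    have hznot : g ∉ gl.keys := fun h => by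
      rw [(PySem.Dict.contains_iff_mem_keys gl g).2 h] at hc
      exact hc rfl
    have h0 : (gl.items.map (fun p => pvStu sg p s)).sum = 0 := by
      apply pvSumZero
      intro p hp
      apply pvStu_zero_of_ne sg hsg s g hmem
      intro h
      exact hznot (h ▸ PySem.Dict.mem_keys_of_mem_items gl hp)
    rw [h0]
    unfold pvVal
    have : gl.contains g = false := by
      cases h : gl.contains g
      · rfl
      · exact absurd h hc
    simp [this]

-- B's workload pass-2 items
theorem pvWorkload_items (sg : PySem.Dict String String) (hsg : sg.keys.Nodup)
    (gl : PySem.Dict String Int) (c pos : PySem.Dict String Int) :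
    (sg.items.foldl (fun w p => w.insert p.1 (pvVal gl c pos p)) PySem.Dict.empty).items
      = sg.items.map (fun p => (p.1, pvVal gl c pos p)) := by
  have := PySem.Dict.items_foldl_insert_fresh (l := sg.items) (k := (·.1))
      (v := fun p => pvVal gl c pos p) (d := PySem.Dict.empty)
      (by intro a _; simp) (by exact hsg)
  simpa using this

-- items of the initial workload dict
theorem pvInit_items (sg : PySem.Dict String String) (hsg : sg.keys.Nodup) :
    (pvInit sg).items = if "Sadr" ∈ sg.keys then sg.keys.map (fun s => (s, (0 : Int)))
      else sg.keys.map (fun s => (s, (0 : Int))) ++ [("Sadr", (0 : Int))] := by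
  unfold pvInit
  have h0 : (sg.keys.foldl (fun d s => d.insert s 0) (PySem.Dict.empty : PySem.Dict String Int)).items
      = sg.keys.map (fun s => (s, (0 : Int))) := by
    have := PySem.Dict.items_foldl_insert_fresh (l := sg.keys) (k := id)
        (v := fun _ => (0 : Int)) (d := PySem.Dict.empty)
        (by intro a _; simp) (by simpa using hsg)
    simpa using this
  have hkeys0 : (sg.keys.foldl (fun d s => d.insert s 0) (PySem.Dict.empty : PySem.Dict String Int)).keys
      = sg.keys := by
    show List.map _ _ = _
    rw [h0, List.map_map]
    exact List.map_id _
  by_cases hS : "Sadr" ∈ sg.keys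
  · have hc : (sg.keys.foldl (fun d s => d.insert s 0) (PySem.Dict.empty : PySem.Dict String Int)).contains "Sadr" = true :=
      (PySem.Dict.contains_iff_mem_keys _ _).2 (by rw [hkeys0]; exact hS)
    rw [PySem.Dict.items_insert_of_contains _ _ hc, h0]
    simp only [hS, if_true, List.map_map]
    apply List.map_congr_left
    intro x _
    by_cases hx : x = "Sadr" <;> simp [hx]
  · have hc : (sg.keys.foldl (fun d s => d.insert s 0) (PySem.Dict.empty : PySem.Dict String Int)).contains "Sadr" = false := by
      rw [PySem.Dict.contains_eq_decide_mem_keys, hkeys0]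
      simp [hS]
    rw [PySem.Dict.items_insert_of_not_contains _ _ hc, h0]
    simp [hS]

-- allocated = sum of all grade allocations
theorem pvAllocated (student_grades : List (String × String)) (grade_lines : List (String × Int)) :
    ((pvMapAdd (pvInit (PySem.Dict.ofList student_grades))
        (fun k => ((PySem.Dict.ofList grade_lines).items.map
            (fun p => pvFA (PySem.Dict.ofList student_grades) p k)).sum)).values).sum
      = (PySem.Dict.ofList grade_lines).values.sum := by
  obtain ⟨hndI, hSadrI, hsubI⟩ := pvInitP (PySem.Dict.ofList student_grades)
  rw [pvMapAdd_values]
  rw [PySem.List.sum_map_add_int]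
  have hz : ((pvInit (PySem.Dict.ofList student_grades)).items.map (fun p => p.2)).sum = 0 := by
    rw [pvInit_items _ (PySem.Dict.nodup_keys_ofList student_grades)]
    split_ifs <;> simp [List.map_map, Function.comp_def]
  have hk : (pvInit (PySem.Dict.ofList student_grades)).items.map
        (fun p => ((PySem.Dict.ofList grade_lines).items.map
            (fun q => pvFA (PySem.Dict.ofList student_grades) q p.1)).sum)
      = ((pvInit (PySem.Dict.ofList student_grades)).keys).map
        (fun k => ((PySem.Dict.ofList grade_lines).items.map
            (fun q => pvFA (PySem.Dict.ofList student_grades) q k)).sum) := by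
    show _ = List.map _ (List.map _ _)
    rw [List.map_map]
    rfl
  rw [hz, hk, pvSumSwap]
  have hcol : (PySem.Dict.ofList grade_lines).items.map
        (fun p => (((pvInit (PySem.Dict.ofList student_grades)).keys).map
            (fun k => pvFA (PySem.Dict.ofList student_grades) p k)).sum)
      = (PySem.Dict.ofList grade_lines).items.map (fun p => p.2) :=
    List.map_congr_left (fun p _ =>
      pvFA_total (PySem.Dict.ofList student_grades) _ hndI hSadrI hsubI p)
  rw [hcol]
  rw [zero_add]
  rfl

-- Σ over grades at one student slot, Sadr contribution included
theorem pvStudent_full (student_grades : List (String × String)) (grade_lines : List (String × Int))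
    (s g : String) (hmem : (s, g) ∈ (PySem.Dict.ofList student_grades).items) :
    ((PySem.Dict.ofList grade_lines).items.map
        (fun p => pvFA (PySem.Dict.ofList student_grades) p s)).sum
      = pvVal (PySem.Dict.ofList grade_lines)
          ((((PySem.Dict.ofList student_grades).items.foldl pvPass1Step (PySem.Dict.empty, PySem.Dict.empty))).1)
          ((((PySem.Dict.ofList student_grades).items.foldl pvPass1Step (PySem.Dict.empty, PySem.Dict.empty))).2)
          (s, g)
        + (if s = "Sadr"
            then ((PySem.Dict.ofList grade_lines).items.map
                (fun p => pvSad (PySem.Dict.ofList student_grades) p)).sum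
            else 0) := by
  have hsplit : (PySem.Dict.ofList grade_lines).items.map
        (fun p => pvFA (PySem.Dict.ofList student_grades) p s)
      = (PySem.Dict.ofList grade_lines).items.map
        (fun p => pvStu (PySem.Dict.ofList student_grades) p s
          + (if s = "Sadr" then pvSad (PySem.Dict.ofList student_grades) p else 0)) := rfl
  rw [hsplit, PySem.List.sum_map_add_int, pvKeySum student_grades grade_lines s g hmem]
  congr 1
  by_cases hs : s = "Sadr" <;> simp [hs]

-- at the Sadr slot, when no student is named "Sadr"
theorem pvSadrOnly (student_grades : List (String × String)) (grade_lines : List (String × Int))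
    (hni : "Sadr" ∉ (PySem.Dict.ofList student_grades).keys) :
    ((PySem.Dict.ofList grade_lines).items.map
        (fun p => pvFA (PySem.Dict.ofList student_grades) p "Sadr")).sum
      = ((PySem.Dict.ofList grade_lines).items.map
          (fun p => pvSad (PySem.Dict.ofList student_grades) p)).sum := by
  apply congrArg
  apply List.map_congr_left
  intro p _
  unfold pvFA
  rw [pvStu_zero_of_not_key _ _ hni]
  simp

-- the item lists agree, for any shared Sadr top-up 'extra'
theorem pvItemsEq (student_grades : List (String × String)) (grade_lines : List (String × Int)) (extra : Int) :
    (pvMapAdd (pvInit (PySem.Dict.ofList student_grades))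
        (fun k => ((PySem.Dict.ofList grade_lines).items.map
            (fun p => pvFA (PySem.Dict.ofList student_grades) p k)).sum
          + (if k = "Sadr" then extra else 0))).items
      = (((PySem.Dict.ofList student_grades).items.foldl
            (fun w p => w.insert p.1 (pvVal (PySem.Dict.ofList grade_lines)
                ((((PySem.Dict.ofList student_grades).items.foldl pvPass1Step (PySem.Dict.empty, PySem.Dict.empty))).1)
                ((((PySem.Dict.ofList student_grades).items.foldl pvPass1Step (PySem.Dict.empty, PySem.Dict.empty))).2) p))
            PySem.Dict.empty).insert "Sadr"
          ((((PySem.Dict.ofList student_grades).items.foldl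
              (fun w p => w.insert p.1 (pvVal (PySem.Dict.ofList grade_lines)
                  ((((PySem.Dict.ofList student_grades).items.foldl pvPass1Step (PySem.Dict.empty, PySem.Dict.empty))).1)
                  ((((PySem.Dict.ofList student_grades).items.foldl pvPass1Step (PySem.Dict.empty, PySem.Dict.empty))).2) p))
              PySem.Dict.empty).getD "Sadr" 0)
            + (((PySem.Dict.ofList grade_lines).items.map
                (fun p => pvSad (PySem.Dict.ofList student_grades) p)).sum + extra))).items := by
  have hsg : (PySem.Dict.ofList student_grades).keys.Nodup := PySem.Dict.nodup_keys_ofList student_grades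
  have hW := pvWorkload_items (PySem.Dict.ofList student_grades) hsg (PySem.Dict.ofList grade_lines)
      ((((PySem.Dict.ofList student_grades).items.foldl pvPass1Step (PySem.Dict.empty, PySem.Dict.empty))).1)
      ((((PySem.Dict.ofList student_grades).items.foldl pvPass1Step (PySem.Dict.empty, PySem.Dict.empty))).2)
  have hWkeys : ((PySem.Dict.ofList student_grades).items.foldl
        (fun w p => w.insert p.1 (pvVal (PySem.Dict.ofList grade_lines)
            ((((PySem.Dict.ofList student_grades).items.foldl pvPass1Step (PySem.Dict.empty, PySem.Dict.empty))).1)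
            ((((PySem.Dict.ofList student_grades).items.foldl pvPass1Step (PySem.Dict.empty, PySem.Dict.empty))).2) p))
        PySem.Dict.empty).keys = (PySem.Dict.ofList student_grades).keys := by
    show List.map _ _ = _
    rw [hW, List.map_map]
    rfl
  have hWnodup := hWkeys ▸ hsg
  by_cases hS : "Sadr" ∈ (PySem.Dict.ofList student_grades).keys
  · -- a student is literally named "Sadr": the shares merge into its slot
    obtain ⟨p0, hp0mem, hp01⟩ : ∃ p ∈ (PySem.Dict.ofList student_grades).items, p.1 = "Sadr" := by
      obtain ⟨p, hp, h1⟩ := List.mem_map.1 hS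
      exact ⟨p, hp, h1⟩
    have hcont : ((PySem.Dict.ofList student_grades).items.foldl
          (fun w p => w.insert p.1 (pvVal (PySem.Dict.ofList grade_lines)
              ((((PySem.Dict.ofList student_grades).items.foldl pvPass1Step (PySem.Dict.empty, PySem.Dict.empty))).1)
              ((((PySem.Dict.ofList student_grades).items.foldl pvPass1Step (PySem.Dict.empty, PySem.Dict.empty))).2) p))
          PySem.Dict.empty).contains "Sadr" = true :=
      (PySem.Dict.contains_iff_mem_keys _ _).2 (hWkeys ▸ hS)
    have hv0 : ((PySem.Dict.ofList student_grades).items.foldl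
          (fun w p => w.insert p.1 (pvVal (PySem.Dict.ofList grade_lines)
              ((((PySem.Dict.ofList student_grades).items.foldl pvPass1Step (PySem.Dict.empty, PySem.Dict.empty))).1)
              ((((PySem.Dict.ofList student_grades).items.foldl pvPass1Step (PySem.Dict.empty, PySem.Dict.empty))).2) p))
          PySem.Dict.empty).getD "Sadr" 0
        = pvVal (PySem.Dict.ofList grade_lines)
            ((((PySem.Dict.ofList student_grades).items.foldl pvPass1Step (PySem.Dict.empty, PySem.Dict.empty))).1)
            ((((PySem.Dict.ofList student_grades).items.foldl pvPass1Step (PySem.Dict.empty, PySem.Dict.empty))).2)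
            ("Sadr", p0.2) := by
      apply PySem.Dict.getD_of_mem_items _ _ hWnodup
      rw [hW]
      rw [show ("Sadr",
          pvVal (PySem.Dict.ofList grade_lines)
            ((((PySem.Dict.ofList student_grades).items.foldl pvPass1Step (PySem.Dict.empty, PySem.Dict.empty))).1)
            ((((PySem.Dict.ofList student_grades).items.foldl pvPass1Step (PySem.Dict.empty, PySem.Dict.empty))).2)
            ("Sadr", p0.2))
          = (p0.1, pvVal (PySem.Dict.ofList grade_lines)
            ((((PySem.Dict.ofList student_grades).items.foldl pvPass1Step (PySem.Dict.empty, PySem.Dict.empty))).1)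
            ((((PySem.Dict.ofList student_grades).items.foldl pvPass1Step (PySem.Dict.empty, PySem.Dict.empty))).2) p0)
          from by rw [← hp01]]
      exact List.mem_map_of_mem hp0mem
    rw [PySem.Dict.items_insert_of_contains _ _ hcont, hW, hv0,
        pvMapAdd, pvInit_items _ hsg]
    simp only [hS, if_true]
    show List.map _ (List.map _ _) = List.map _ (List.map _ _)
    rw [List.map_map, List.map_map]
    have hkeys : (PySem.Dict.ofList student_grades).keys
        = (PySem.Dict.ofList student_grades).items.map (·.1) := rfl
    rw [hkeys, List.map_map]
    apply List.map_congr_left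
    intro q hq
    simp only [Function.comp_def]
    have hmemq : (q.1, q.2) ∈ (PySem.Dict.ofList student_grades).items := hq
    have hstu := pvStudent_full student_grades grade_lines q.1 q.2 hmemq
    by_cases hq1 : q.1 = "Sadr"
    · have hbq : (q.1 == "Sadr") = true := by simp [hq1]
      have hsame : p0.2 = q.2 := by
        have e1 : (PySem.Dict.ofList student_grades).get? p0.1 = some p0.2 :=
          PySem.Dict.get?_of_mem_items _ (by exact hp0mem) hsg
        have e2 : (PySem.Dict.ofList student_grades).get? q.1 = some q.2 :=
          PySem.Dict.get?_of_mem_items _ hmemq hsg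
        rw [hp01] at e1
        rw [hq1] at e2
        rw [e1] at e2
        exact Option.some.inj e2
      simp only [hbq, if_true]
      rw [hstu]
      simp [hq1, hsame, add_assoc]
    · have hbq : (q.1 == "Sadr") = false := by simp [hq1]
      simp only [hbq, if_false, Bool.false_eq_true]
      rw [hstu]
      simp [hq1]
  · -- no student named "Sadr": its entry is appended at the end on both sides
    have hcont : ((PySem.Dict.ofList student_grades).items.foldl
          (fun w p => w.insert p.1 (pvVal (PySem.Dict.ofList grade_lines)
              ((((PySem.Dict.ofList student_grades).items.foldl pvPass1Step (PySem.Dict.empty, PySem.Dict.empty))).1)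
              ((((PySem.Dict.ofList student_grades).items.foldl pvPass1Step (PySem.Dict.empty, PySem.Dict.empty))).2) p))
          PySem.Dict.empty).contains "Sadr" = false := by
      rw [PySem.Dict.contains_eq_decide_mem_keys, hWkeys]
      simp [hS]
    have hv0 : ((PySem.Dict.ofList student_grades).items.foldl
          (fun w p => w.insert p.1 (pvVal (PySem.Dict.ofList grade_lines)
              ((((PySem.Dict.ofList student_grades).items.foldl pvPass1Step (PySem.Dict.empty, PySem.Dict.empty))).1)
              ((((PySem.Dict.ofList student_grades).items.foldl pvPass1Step (PySem.Dict.empty, PySem.Dict.empty))).2) p))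
          PySem.Dict.empty).getD "Sadr" 0 = 0 :=
      PySem.Dict.getD_of_not_contains _ 0 hcont
    rw [PySem.Dict.items_insert_of_not_contains _ _ hcont, hW, hv0,
        pvMapAdd, pvInit_items _ hsg]
    simp only [hS, if_false]
    show List.map _ (List.map _ _ ++ _) = _
    rw [List.map_append, List.map_map]
    have hkeys : (PySem.Dict.ofList student_grades).keys
        = (PySem.Dict.ofList student_grades).items.map (·.1) := rfl
    rw [hkeys, List.map_map]
    congr 1
    · apply List.map_congr_left
      intro q hq
      simp only [Function.comp_def]
      have hmemq : (q.1, q.2) ∈ (PySem.Dict.ofList student_grades).items := hq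
      have hq1 : q.1 ≠ "Sadr" := by
        intro h
        exact hS (h ▸ PySem.Dict.mem_keys_of_mem_items _ hmemq)
      rw [pvStudent_full student_grades grade_lines q.1 q.2 hmemq]
      simp [hq1]
    · simp only [List.map_cons, List.map_nil]
      rw [pvSadrOnly student_grades grade_lines hS]
      simp

theorem pvFinal (total_lines : Int) (student_grades : List (String × String)) (grade_lines : List (String × Int)) :
    assign_lines total_lines student_grades grade_lines
      = assign_lines_alt total_lines student_grades grade_lines := by
  unfold assign_lines assign_lines_alt
  simp only []
  have hsg : (PySem.Dict.ofList student_grades).keys.Nodup := PySem.Dict.nodup_keys_ofList student_grades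
  obtain ⟨hndI, hSadrI, hsubI⟩ := pvInitP (PySem.Dict.ofList student_grades)
  rw [pvLoopA (PySem.Dict.ofList student_grades) hsg (PySem.Dict.ofList grade_lines).items
      (pvInit (PySem.Dict.ofList student_grades)) (pvInitP _)]
  rw [pvAllocated student_grades grade_lines]
  rw [pvSadr0_eq (PySem.Dict.ofList student_grades) (PySem.Dict.ofList grade_lines).items]
  by_cases hcond : (PySem.Dict.ofList grade_lines).values.sum < total_lines
  · simp only [hcond, if_true]
    rw [pvBump_mem _ "Sadr" _ (by rw [pvMapAdd_keys]; exact hndI) (by rw [pvMapAdd_keys]; exact hSadrI),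
        pvMapAdd_mapAdd]
    exact pvItemsEq student_grades grade_lines
      (total_lines - (PySem.Dict.ofList grade_lines).values.sum)
  · simp only [hcond, if_false]
    have hA : pvMapAdd (pvInit (PySem.Dict.ofList student_grades))
          (fun k => ((PySem.Dict.ofList grade_lines).items.map
              (fun p => pvFA (PySem.Dict.ofList student_grades) p k)).sum)
        = pvMapAdd (pvInit (PySem.Dict.ofList student_grades))
          (fun k => ((PySem.Dict.ofList grade_lines).items.map
              (fun p => pvFA (PySem.Dict.ofList student_grades) p k)).sum
            + (if k = "Sadr" then (0 : Int) else 0)) :=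
      pvMapAdd_congr _ _ _ (fun k => by simp)
    rw [hA]
    have hB : ((PySem.Dict.ofList grade_lines).items.map
          (fun p => pvSad (PySem.Dict.ofList student_grades) p)).sum
        = ((PySem.Dict.ofList grade_lines).items.map
            (fun p => pvSad (PySem.Dict.ofList student_grades) p)).sum + (0 : Int) :=
      (add_zero _).symm
    rw [hB]
    exact pvItemsEq student_grades grade_lines 0

-- ===== VERDICT (by name: the statement is the Claim_ definition above) =====
theorem assign_lines_spec : Claim_equal_assign_lines := by
  intro total_lines student_grades grade_lines _
  show assign_lines _ _ _ = _
  exact pvFinal total_lines student_grades grade_lines
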